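-- pv_equiv track=rewrite | github.com/lookup1980/microbench-blackwell | umma_latency/benchmark.py | get_mn_configs
-- ===== SOURCE A (Python) =====
-- CONFIGS_DENSE_1SM = [
--     (64, 64), (64, 80), (64, 96), (64, 112), (64, 128), (64, 256),
--     (128, 64), (128, 80), (128, 96), (128, 112), (128, 128), (128, 256),
-- ]
--
-- CONFIGS_DENSE_2SM = [
--     (128, 64), (128, 80), (128, 96), (128, 112), (128, 128), (128, 256),
--     (256, 64), (256, 80), (256, 96), (256, 112), (256, 128), (256, 256),
-- ]
--
-- CONFIGS_MX_1SM = [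
--     (128, 64), (128, 80), (128, 96), (128, 112), (128, 128), (128, 256),
-- ]
--
-- CONFIGS_MX_2SM = [
--     (128, 64), (128, 80), (128, 96), (128, 112), (128, 128), (128, 256),
--     (256, 64), (256, 80), (256, 96), (256, 112), (256, 128), (256, 256),
-- ]
--
-- def get_mn_configs(fmt_info, cta_group, n_sweep=None):
--     """Get (M, N) configs for given format and CTA group."""
--     is_mx = fmt_info.get('mx', False)
--
--     if n_sweep:
--         n_start, n_stop, n_step = n_sweep
--         n_values = list(range(n_start, n_stop + 1, n_step))
--         if is_mx:
--             ms = [128] if cta_group == 1 else [128, 256]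
--         else:
--             ms = [64, 128] if cta_group == 1 else [128, 256]
--         return [(m, n) for m in ms for n in n_values]
--
--     if is_mx:
--         return CONFIGS_MX_1SM if cta_group == 1 else CONFIGS_MX_2SM
--     return CONFIGS_DENSE_1SM if cta_group == 1 else CONFIGS_DENSE_2SM
-- ===== SOURCE B (Python) =====
-- def get_mn_configs(fmt_info, cta_group, n_sweep=None):
--     """Get (M, N) configs for given format and CTA group."""
--     is_mx = fmt_info.get('mx', False)
--
--     if n_sweep:
--         n_start, n_stop, n_step = n_sweep
--         n_values = list(range(n_start, n_stop + 1, n_step))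
--     else:
--         n_values = [64, 80, 96, 112, 128, 256]
--
--     if is_mx:
--         ms = [128] if cta_group == 1 else [128, 256]
--     else:
--         ms = [64, 128] if cta_group == 1 else [128, 256]
--
--     return [(m, n) for m in ms for n in n_values]
-- ===== Notes on version B (the rewrite author's own statement) =====
-- stated objective: simpler
-- what changed: B deletes the four module-level precomputed CONFIGS_* tables and the table-lookup branch, instead deriving n_values (swept range or the default [64,80,96,112,128,256]) and ms uniformly and returning their ordered product from one comprehension.
import Mathlib
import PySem

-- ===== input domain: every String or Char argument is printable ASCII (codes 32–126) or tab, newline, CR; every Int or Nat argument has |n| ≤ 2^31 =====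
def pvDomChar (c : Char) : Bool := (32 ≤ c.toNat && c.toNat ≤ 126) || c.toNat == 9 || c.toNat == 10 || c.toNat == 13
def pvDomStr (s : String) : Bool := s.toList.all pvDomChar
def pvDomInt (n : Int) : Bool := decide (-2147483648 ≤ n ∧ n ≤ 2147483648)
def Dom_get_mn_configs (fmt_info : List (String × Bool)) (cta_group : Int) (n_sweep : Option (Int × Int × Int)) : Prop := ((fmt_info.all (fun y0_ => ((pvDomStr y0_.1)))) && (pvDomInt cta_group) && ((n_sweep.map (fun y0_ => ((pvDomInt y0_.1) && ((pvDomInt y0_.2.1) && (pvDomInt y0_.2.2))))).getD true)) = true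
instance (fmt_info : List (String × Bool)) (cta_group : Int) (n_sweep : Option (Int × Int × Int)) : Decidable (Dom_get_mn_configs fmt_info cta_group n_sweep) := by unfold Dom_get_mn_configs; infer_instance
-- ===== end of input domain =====

-- B replaces A's four precomputed constant tables and its table-lookup branch by one
-- uniform product computation (simpler); equivalence is about the return VALUE only
-- (A returns the shared module-level list in the non-sweep cases, B a fresh list).

-- ===== PORT A =====
def CONFIGS_DENSE_1SM : List (Int × Int) :=
  [(64, 64), (64, 80), (64, 96), (64, 112), (64, 128), (64, 256),
   (128, 64), (128, 80), (128, 96), (128, 112), (128, 128), (128, 256)]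

def CONFIGS_DENSE_2SM : List (Int × Int) :=
  [(128, 64), (128, 80), (128, 96), (128, 112), (128, 128), (128, 256),
   (256, 64), (256, 80), (256, 96), (256, 112), (256, 128), (256, 256)]

def CONFIGS_MX_1SM : List (Int × Int) :=
  [(128, 64), (128, 80), (128, 96), (128, 112), (128, 128), (128, 256)]

def CONFIGS_MX_2SM : List (Int × Int) :=
  [(128, 64), (128, 80), (128, 96), (128, 112), (128, 128), (128, 256),
   (256, 64), (256, 80), (256, 96), (256, 112), (256, 128), (256, 256)]

def get_mn_configs (fmt_info : List (String × Bool)) (cta_group : Int) (n_sweep : Option (Int × Int × Int)) : List (Int × Int) :=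
  let is_mx := PySem.Dict.getD (PySem.Dict.mk fmt_info) "mx" false
  match n_sweep with
  | some (n_start, n_stop, n_step) =>
      -- a non-empty tuple is always truthy in Python, so `if n_sweep:` = `some`
      let n_values := PySem.List.pyRange n_start (n_stop + 1) n_step
      let ms : List Int :=
        if is_mx then (if cta_group == 1 then [128] else [128, 256])
        else (if cta_group == 1 then [64, 128] else [128, 256])
      ms.flatMap (fun m => n_values.map (fun n => (m, n)))
  | none =>
      if is_mx then (if cta_group == 1 then CONFIGS_MX_1SM else CONFIGS_MX_2SM)
      else (if cta_group == 1 then CONFIGS_DENSE_1SM else CONFIGS_DENSE_2SM)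

-- ===== PORT B =====
def get_mn_configs_alt (fmt_info : List (String × Bool)) (cta_group : Int) (n_sweep : Option (Int × Int × Int)) : List (Int × Int) :=
  let is_mx := PySem.Dict.getD (PySem.Dict.mk fmt_info) "mx" false
  let n_values : List Int :=
    match n_sweep with
    | some (n_start, n_stop, n_step) => PySem.List.pyRange n_start (n_stop + 1) n_step
    | none => [64, 80, 96, 112, 128, 256]
  let ms : List Int :=
    if is_mx then (if cta_group == 1 then [128] else [128, 256])
    else (if cta_group == 1 then [64, 128] else [128, 256])
  ms.flatMap (fun m => n_values.map (fun n => (m, n)))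

-- ===== PRECONDITION & SPEC =====
-- Pre_ excludes only the inputs where A raises: range() with step 0 (ValueError).
def Pre_get_mn_configs (fmt_info : List (String × Bool)) (cta_group : Int) (n_sweep : Option (Int × Int × Int)) : Prop :=
  ∀ t ∈ n_sweep, t.2.2 ≠ 0
instance (fmt_info : List (String × Bool)) (cta_group : Int) (n_sweep : Option (Int × Int × Int)) : Decidable (Pre_get_mn_configs fmt_info cta_group n_sweep) := by unfold Pre_get_mn_configs; infer_instance

def pvWitness_get_mn_configs : (List (String × Bool)) × Int × (Option (Int × Int × Int)) :=
  ([("mx", true)], 1, some (64, 128, 16))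

def Spec_get_mn_configs (fmt_info : List (String × Bool)) (cta_group : Int) (n_sweep : Option (Int × Int × Int)) (out : List (Int × Int)) : Prop := out = get_mn_configs_alt fmt_info cta_group n_sweep
instance (fmt_info : List (String × Bool)) (cta_group : Int) (n_sweep : Option (Int × Int × Int)) (out : List (Int × Int)) : Decidable (Spec_get_mn_configs fmt_info cta_group n_sweep out) := by unfold Spec_get_mn_configs; infer_instance

-- ===== CLAIM (what is proved, stated in full; the proofs are below) =====
def Claim_equal_get_mn_configs : Prop := ∀ (fmt_info : List (String × Bool)) (cta_group : Int) (n_sweep : Option (Int × Int × Int)), Dom_get_mn_configs fmt_info cta_group n_sweep → Pre_get_mn_configs fmt_info cta_group n_sweep → Spec_get_mn_configs fmt_info cta_group n_sweep (get_mn_configs fmt_info cta_group n_sweep)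

-- ===== LEMMAS AND PROOFS =====

-- ===== VERDICT (by name: the statement is the Claim_ definition above) =====
theorem get_mn_configs_spec : Claim_equal_get_mn_configs := by
  intro fmt_info cta_group n_sweep _ _
  unfold Spec_get_mn_configs get_mn_configs get_mn_configs_alt
  cases n_sweep with
  | some t => rfl
  | none =>
      cases h : PySem.Dict.getD (PySem.Dict.mk fmt_info) "mx" false <;> by_cases hc : cta_group == 1 <;>
        simp [hc] <;> decide
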